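-- pv_equiv track=rewrite | github.com/Egraf99/Running_line | symbols.py | from_third_to_up_and_center_and_from_bottom_to_center
-- ===== SOURCE A (Python) =====
-- def from_third_to_up_and_center_and_from_bottom_to_center(pix_column: list, height: int, symbol_id, order_col) -> list:
--     if order_col <= (height // 3):
--         for h in range(height):
--             if h <= height // 2 and height - order_col >= height // 4 and order_col < height // 2 * 2:
--                 if h == ((height // 3) - order_col):
--                     pix_column.append(symbol_id[0])
--                 elif h == ((height // 3) + order_col - 1):
--                     pix_column.append(symbol_id[1])
--                 else:
--                     pix_column.append(0)
--             elif h > height // 2: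
--                 if h == height - order_col - 1:
--                     pix_column.append(symbol_id[0])
--                 else:
--                     pix_column.append(0)
--             else:
--                 pix_column.append(0)
--         return pix_column
-- ===== SOURCE B (Python) =====
-- def _build_col(height, symbol_id, order_col):
--     col = [0] * height
--     third, half = height // 3, height // 2
--     if height - order_col >= height // 4 and order_col < height // 2 * 2:
--         i = third + order_col - 1
--         if 0 <= i <= half:
--             col[i] = symbol_id[1]
--         j = third - order_col
--         if 0 <= j <= half:
--             col[j] = symbol_id[0]
--     k = height - order_col - 1
--     if half < k < height:
--         col[k] = symbol_id[0]
--     return col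
--
--
-- def from_third_to_up_and_center_and_from_bottom_to_center(pix_column: list, height: int, symbol_id, order_col) -> list:
--     if order_col > height // 3:
--         return None
--     pix_column.extend(_build_col(height, symbol_id, order_col))
--     return pix_column
-- ===== Notes on version B (the rewrite author's own statement) =====
-- stated objective: simpler
-- what changed: Replaces the per-pixel loop with branch chains by direct construction: a zero column of length height with at most three special positions written into it by index, then extended onto pix_column.
import Mathlib
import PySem

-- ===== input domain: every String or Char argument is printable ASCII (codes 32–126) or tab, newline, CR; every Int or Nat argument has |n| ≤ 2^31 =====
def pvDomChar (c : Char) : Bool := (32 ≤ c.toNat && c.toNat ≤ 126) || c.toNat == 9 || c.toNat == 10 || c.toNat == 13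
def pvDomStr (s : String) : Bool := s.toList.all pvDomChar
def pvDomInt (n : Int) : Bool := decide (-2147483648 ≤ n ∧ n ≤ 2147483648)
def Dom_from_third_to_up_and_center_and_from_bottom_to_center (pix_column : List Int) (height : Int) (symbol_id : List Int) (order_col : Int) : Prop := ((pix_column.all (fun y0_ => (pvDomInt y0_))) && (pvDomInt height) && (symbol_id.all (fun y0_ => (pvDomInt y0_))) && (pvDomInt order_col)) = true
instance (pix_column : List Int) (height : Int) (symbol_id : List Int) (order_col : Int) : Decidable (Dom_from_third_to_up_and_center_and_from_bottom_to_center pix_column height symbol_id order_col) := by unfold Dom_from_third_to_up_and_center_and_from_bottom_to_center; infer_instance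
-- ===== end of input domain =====

-- B builds the zero column directly and writes the (at most three) special pixels by index — simpler
-- than A's per-pixel loop of branch chains.  Both Pythons mutate pix_column in the same way (extend by
-- the new column); the equivalence proved here is about the RETURN value.

-- ===== PORT A =====
def from_third_to_up_and_center_and_from_bottom_to_center (pix_column : List Int) (height : Int) (symbol_id : List Int) (order_col : Int) : Option (List Int) :=
  if order_col ≤ PySem.Int.floordiv height 3 then
    some ((PySem.List.pyRange 0 height 1).foldl (fun acc h =>
      if h ≤ PySem.Int.floordiv height 2 ∧ height - order_col ≥ PySem.Int.floordiv height 4 ∧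
          order_col < PySem.Int.floordiv height 2 * 2 then
        if h = PySem.Int.floordiv height 3 - order_col then acc ++ [PySem.List.pyGetD symbol_id 0 0]
        else if h = PySem.Int.floordiv height 3 + order_col - 1 then acc ++ [PySem.List.pyGetD symbol_id 1 0]
        else acc ++ [0]
      else if h > PySem.Int.floordiv height 2 then
        if h = height - order_col - 1 then acc ++ [PySem.List.pyGetD symbol_id 0 0]
        else acc ++ [0]
      else acc ++ [0]) pix_column)
  else none

-- ===== PORT B =====
def pvBuildCol (height : Int) (symbol_id : List Int) (order_col : Int) : List Int :=
  let third := PySem.Int.floordiv height 3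
  let half := PySem.Int.floordiv height 2
  let col0 : List Int := List.replicate height.toNat 0
  let col1 :=
    if height - order_col ≥ PySem.Int.floordiv height 4 ∧ order_col < PySem.Int.floordiv height 2 * 2 then
      let i := third + order_col - 1
      let colA := if 0 ≤ i ∧ i ≤ half then PySem.List.pySetD col0 i (PySem.List.pyGetD symbol_id 1 0) else col0
      let j := third - order_col
      if 0 ≤ j ∧ j ≤ half then PySem.List.pySetD colA j (PySem.List.pyGetD symbol_id 0 0) else colA
    else col0
  let k := height - order_col - 1
  if half < k ∧ k < height then PySem.List.pySetD col1 k (PySem.List.pyGetD symbol_id 0 0) else col1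

def from_third_to_up_and_center_and_from_bottom_to_center_alt (pix_column : List Int) (height : Int) (symbol_id : List Int) (order_col : Int) : Option (List Int) :=
  if order_col > PySem.Int.floordiv height 3 then none
  else some (pix_column ++ pvBuildCol height symbol_id order_col)

-- ===== PRECONDITION & SPEC =====
-- Pre_ excludes exactly the inputs on which A raises IndexError reading symbol_id[0] / symbol_id[1]
-- (symbol_id too short while a special pixel position is hit); B raises there as well.
def Pre_from_third_to_up_and_center_and_from_bottom_to_center (pix_column : List Int) (height : Int) (symbol_id : List Int) (order_col : Int) : Prop :=
  order_col ≤ PySem.Int.floordiv height 3 →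
    (((height - order_col ≥ PySem.Int.floordiv height 4 ∧ order_col < PySem.Int.floordiv height 2 * 2) ∧
        0 ≤ PySem.Int.floordiv height 3 + order_col - 1 ∧
        PySem.Int.floordiv height 3 + order_col - 1 ≤ PySem.Int.floordiv height 2 →
      2 ≤ symbol_id.length) ∧
     ((((height - order_col ≥ PySem.Int.floordiv height 4 ∧ order_col < PySem.Int.floordiv height 2 * 2) ∧
          0 ≤ PySem.Int.floordiv height 3 - order_col ∧
          PySem.Int.floordiv height 3 - order_col ≤ PySem.Int.floordiv height 2) ∨
       (PySem.Int.floordiv height 2 < height - order_col - 1 ∧ height - order_col - 1 < height)) →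
      1 ≤ symbol_id.length))
instance (pix_column : List Int) (height : Int) (symbol_id : List Int) (order_col : Int) : Decidable (Pre_from_third_to_up_and_center_and_from_bottom_to_center pix_column height symbol_id order_col) := by unfold Pre_from_third_to_up_and_center_and_from_bottom_to_center; infer_instance

def pvWitness_from_third_to_up_and_center_and_from_bottom_to_center : List Int × Int × List Int × Int := ([], 6, [7, 8], 1)

def Spec_from_third_to_up_and_center_and_from_bottom_to_center (pix_column : List Int) (height : Int) (symbol_id : List Int) (order_col : Int) (out : Option (List Int)) : Prop := out = from_third_to_up_and_center_and_from_bottom_to_center_alt pix_column height symbol_id order_col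
instance (pix_column : List Int) (height : Int) (symbol_id : List Int) (order_col : Int) (out : Option (List Int)) : Decidable (Spec_from_third_to_up_and_center_and_from_bottom_to_center pix_column height symbol_id order_col out) := by unfold Spec_from_third_to_up_and_center_and_from_bottom_to_center; infer_instance

-- ===== CLAIM (what is proved, stated in full; the proofs are below) =====
def Claim_equal_from_third_to_up_and_center_and_from_bottom_to_center : Prop := ∀ (pix_column : List Int) (height : Int) (symbol_id : List Int) (order_col : Int), Dom_from_third_to_up_and_center_and_from_bottom_to_center pix_column height symbol_id order_col → Pre_from_third_to_up_and_center_and_from_bottom_to_center pix_column height symbol_id order_col → Spec_from_third_to_up_and_center_and_from_bottom_to_center pix_column height symbol_id order_col (from_third_to_up_and_center_and_from_bottom_to_center pix_column height symbol_id order_col)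

-- ===== LEMMAS AND PROOFS =====

-- the value A appends at loop index h
def pvG (height order_col s0 s1 : Int) (h : Int) : Int :=
  if h ≤ PySem.Int.floordiv height 2 ∧ height - order_col ≥ PySem.Int.floordiv height 4 ∧
      order_col < PySem.Int.floordiv height 2 * 2 then
    if h = PySem.Int.floordiv height 3 - order_col then s0
    else if h = PySem.Int.floordiv height 3 + order_col - 1 then s1
    else 0
  else if h > PySem.Int.floordiv height 2 then
    if h = height - order_col - 1 then s0 else 0
  else 0

lemma pvA_loop (pix : List Int) (height symbol_id_0 symbol_id_1 order_col : Int) :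
    (PySem.List.pyRange 0 height 1).foldl (fun acc h =>
      if h ≤ PySem.Int.floordiv height 2 ∧ height - order_col ≥ PySem.Int.floordiv height 4 ∧
          order_col < PySem.Int.floordiv height 2 * 2 then
        if h = PySem.Int.floordiv height 3 - order_col then acc ++ [symbol_id_0]
        else if h = PySem.Int.floordiv height 3 + order_col - 1 then acc ++ [symbol_id_1]
        else acc ++ [0]
      else if h > PySem.Int.floordiv height 2 then
        if h = height - order_col - 1 then acc ++ [symbol_id_0]
        else acc ++ [0]
      else acc ++ [0]) pix
    = pix ++ (PySem.List.pyRange 0 height 1).map (pvG height order_col symbol_id_0 symbol_id_1) := by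
  have hfun : (fun (acc : List Int) (h : Int) =>
      if h ≤ PySem.Int.floordiv height 2 ∧ height - order_col ≥ PySem.Int.floordiv height 4 ∧
          order_col < PySem.Int.floordiv height 2 * 2 then
        if h = PySem.Int.floordiv height 3 - order_col then acc ++ [symbol_id_0]
        else if h = PySem.Int.floordiv height 3 + order_col - 1 then acc ++ [symbol_id_1]
        else acc ++ [0]
      else if h > PySem.Int.floordiv height 2 then
        if h = height - order_col - 1 then acc ++ [symbol_id_0]
        else acc ++ [0]
      else acc ++ [0])
      = fun acc h => acc ++ [pvG height order_col symbol_id_0 symbol_id_1 h] := by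
    funext acc h
    simp only [pvG]
    split_ifs <;> rfl
  rw [hfun, PySem.List.foldl_append_singleton_eq_map]

lemma pv_getElem_pySetD {l : List Int} {i : Int} {v : Int} {m : Nat} (hi : 0 ≤ i) (hm : m < (PySem.List.pySetD l i v).length) :
    (PySem.List.pySetD l i v)[m]'hm =
      if i = (m : Int) then v else l[m]'(by rwa [PySem.List.length_pySetD] at hm) := by
  simp only [PySem.List.pySetD_of_nonneg _ _ hi, List.getElem_set]
  split_ifs <;> first | rfl | omega

lemma pvMap_eq_buildCol (height : Int) (symbol_id : List Int) (order_col : Int) :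
    (PySem.List.pyRange 0 height 1).map
      (pvG height order_col (PySem.List.pyGetD symbol_id 0 0) (PySem.List.pyGetD symbol_id 1 0))
    = pvBuildCol height symbol_id order_col := by
  have hq := (PySem.Int.floordiv_eq_iff_of_pos (show (0:Int) < 2 by norm_num)).mp
      (rfl : PySem.Int.floordiv height 2 = PySem.Int.floordiv height 2)
  simp only [pvBuildCol]
  apply List.ext_getElem
  · simp only [List.length_map, PySem.List.length_pyRange_one]
    split_ifs <;> simp only [PySem.List.length_pySetD, List.length_replicate] <;> omega
  · intro m hm1 hm2
    simp only [List.length_map, PySem.List.length_pyRange_one] at hm1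
    rw [List.getElem_map, PySem.List.getElem_pyRange_one]
    split_ifs <;>
    · repeat' first
        | rw [pv_getElem_pySetD (show (0:Int) ≤ height - order_col - 1 by omega)]
        | rw [pv_getElem_pySetD (show (0:Int) ≤ PySem.Int.floordiv height 3 - order_col by omega)]
        | rw [pv_getElem_pySetD (show (0:Int) ≤ PySem.Int.floordiv height 3 + order_col - 1 by omega)]
      simp only [List.getElem_replicate, pvG]
      split_ifs <;> omega

-- ===== VERDICT (by name: the statement is the Claim_ definition above) =====
theorem from_third_to_up_and_center_and_from_bottom_to_center_spec : Claim_equal_from_third_to_up_and_center_and_from_bottom_to_center := by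
  intro pix height sym oc _dom _pre
  unfold Spec_from_third_to_up_and_center_and_from_bottom_to_center
  unfold from_third_to_up_and_center_and_from_bottom_to_center from_third_to_up_and_center_and_from_bottom_to_center_alt
  by_cases hoc : oc ≤ PySem.Int.floordiv height 3
  · rw [if_pos hoc, if_neg (by omega), pvA_loop, pvMap_eq_buildCol]
  · rw [if_neg hoc, if_pos (by omega)]
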